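-- pv_equiv track=rewrite | github.com/KristenTse/Data-Structures | Labs/Lab 10.py | list_intersection
-- ===== SOURCE A (Python) =====
-- def list_intersection(lst1, lst2):
--     dict = {}
--     intersections = []
--
--     for i in range(max(len(lst1), len(lst2))):
--         if len(lst1) > len(lst2):
--             dict[lst1[i]] = None
--         else:
--             dict[lst2[i]] = None
--     for i in range(min(len(lst1), len(lst2))):
--         if len(lst1) > len(lst2) and lst2[i] in dict:
--             dict[lst2[i]] = True
--         elif len(lst1) <= len(lst2) and lst1[i] in dict:
--             dict[lst1[i]] = True
--     return [key for key, val in dict.items() if val == True]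
-- ===== SOURCE B (Python) =====
-- def list_intersection(lst1, lst2):
--     # index the smaller list as a set, scan the larger once with a seen-set
--     larger, smaller = (lst1, lst2) if len(lst1) > len(lst2) else (lst2, lst1)
--     small = set(smaller)
--     seen = set()
--     result = []
--     for x in larger:
--         if x in small and x not in seen:
--             seen.add(x)
--             result.append(x)
--     return result
-- ===== Notes on version B (the rewrite author's own statement) =====
-- stated objective: faster
-- what changed: Replaces A's three passes (fill a dict from the larger list, mark via an elif chain over the smaller, then filter dict items) by building a set from the smaller list and one scan of the larger list with a seen-set that appends matches directly; the mark-then-filter step and the dict of None/True flags disappear.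
import Mathlib
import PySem

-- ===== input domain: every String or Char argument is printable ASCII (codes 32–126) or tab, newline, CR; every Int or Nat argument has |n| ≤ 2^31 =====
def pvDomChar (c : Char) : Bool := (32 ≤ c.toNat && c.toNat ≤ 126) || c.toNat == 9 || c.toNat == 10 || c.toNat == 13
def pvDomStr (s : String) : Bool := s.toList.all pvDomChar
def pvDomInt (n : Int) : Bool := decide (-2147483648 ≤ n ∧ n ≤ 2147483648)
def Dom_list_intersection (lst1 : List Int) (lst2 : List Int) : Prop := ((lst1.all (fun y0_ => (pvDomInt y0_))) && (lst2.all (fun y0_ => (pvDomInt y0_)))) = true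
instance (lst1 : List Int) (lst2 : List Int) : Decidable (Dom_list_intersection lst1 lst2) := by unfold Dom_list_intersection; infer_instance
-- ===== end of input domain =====

-- B replaces A's three passes (dict fill from the larger list, mark-loop over the smaller, filter of the dict items)
-- by a set built from the smaller list and ONE scan of the larger list with a seen-set appending matches directly.

-- ===== PORT A =====
-- the range indices are always in range for the indexed list, so pyGetD's default 0 is never used — exact
def list_intersection (lst1 : List Int) (lst2 : List Int) : List Int :=
  let dict1 : PySem.Dict Int (Option Bool) :=
    (PySem.List.pyRange 0 (max (PySem.List.len lst1) (PySem.List.len lst2))).foldl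
      (fun d i =>
        if PySem.List.len lst1 > PySem.List.len lst2 then
          d.insert (PySem.List.pyGetD lst1 i 0) none
        else
          d.insert (PySem.List.pyGetD lst2 i 0) none)
      PySem.Dict.empty
  let dict2 :=
    (PySem.List.pyRange 0 (min (PySem.List.len lst1) (PySem.List.len lst2))).foldl
      (fun d i =>
        if PySem.List.len lst1 > PySem.List.len lst2 ∧ d.contains (PySem.List.pyGetD lst2 i 0) = true then
          d.insert (PySem.List.pyGetD lst2 i 0) (some true)
        else if PySem.List.len lst1 ≤ PySem.List.len lst2 ∧ d.contains (PySem.List.pyGetD lst1 i 0) = true then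
          d.insert (PySem.List.pyGetD lst1 i 0) (some true)
        else d)
      dict1
  (dict2.items.filter (fun p => p.2 == some true)).map (fun p => p.1)

-- ===== PORT B =====
def list_intersection_alt (lst1 : List Int) (lst2 : List Int) : List Int :=
  let pr := if lst1.length > lst2.length then (lst1, lst2) else (lst2, lst1)
  let small : PySem.Set Int := PySem.Set.ofList pr.2
  let st :=
    pr.1.foldl
      (fun st x =>
        if small.contains x && !(PySem.Set.contains st.1 x) then
          (PySem.Set.add st.1 x, st.2 ++ [x])
        else st)
      ((PySem.Set.empty : PySem.Set Int), ([] : List Int))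
  st.2

-- ===== PRECONDITION & SPEC =====
def Spec_list_intersection (lst1 : List Int) (lst2 : List Int) (out : List Int) : Prop := out = list_intersection_alt lst1 lst2
instance (lst1 : List Int) (lst2 : List Int) (out : List Int) : Decidable (Spec_list_intersection lst1 lst2 out) := by unfold Spec_list_intersection; infer_instance

-- ===== CLAIM (what is proved, stated in full; the proofs are below) =====
def Claim_equal_list_intersection : Prop := ∀ (lst1 : List Int) (lst2 : List Int), Dom_list_intersection lst1 lst2 → Spec_list_intersection lst1 lst2 (list_intersection lst1 lst2)

-- ===== LEMMAS AND PROOFS =====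

-- the common intermediate form: scan L, keep first occurrences that lie in S (seen = the list of already-kept checks)
def pvCore (S : List Int) : List Int → List Int → List Int
  | [], _ => []
  | x :: xs, seen =>
    if x ∈ seen then pvCore S xs seen
    else if x ∈ S then x :: pvCore S xs (seen ++ [x]) else pvCore S xs (seen ++ [x])

lemma pvB_step (S : List Int) :
    ∀ (L : List Int) (s t acc : List Int), (∀ x, x ∈ S → (x ∈ s ↔ x ∈ t)) →
    (L.foldl
      (fun st x =>
        if (PySem.Set.ofList S).contains x && !(PySem.Set.contains st.1 x) then
          (PySem.Set.add st.1 x, st.2 ++ [x])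
        else st)
      ((s : PySem.Set Int), acc)).2 = acc ++ pvCore S L t := by
  intro L
  induction L with
  | nil => intro s t acc _; simp [pvCore]
  | cons x xs ih =>
    intro s t acc hinv
    simp only [List.foldl_cons, pvCore]
    by_cases hS : x ∈ S
    · have hsm : (PySem.Set.ofList S).contains x = true := by
        rw [PySem.Set.contains_iff]; exact (PySem.Set.mem_ofList S x).mpr hS
      by_cases hs : x ∈ s
      · have ht : x ∈ t := (hinv x hS).mp hs
        have hc : PySem.Set.contains s x = true := by rw [PySem.Set.contains_iff]; exact hs
        simp only [hsm, hc, Bool.not_true, Bool.and_false, if_pos ht]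
        exact ih s t acc hinv
      · have ht : x ∉ t := fun h => hs ((hinv x hS).mpr h)
        have hc : PySem.Set.contains s x = false := by
          rw [Bool.eq_false_iff]; intro h; exact hs ((PySem.Set.contains_iff s x).mp h)
        simp only [hsm, hc, Bool.not_false, Bool.and_true, if_true, if_neg ht, if_pos hS]
        have hadd : PySem.Set.add s x = s ++ [x] := by
          simp [PySem.Set.add, hs]
        rw [hadd, ih (s ++ [x]) (t ++ [x]) (acc ++ [x]) ?_]
        · simp
        · intro y hy
          simp only [List.mem_append, List.mem_singleton]
          exact or_congr (hinv y hy) Iff.rfl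
    · have hsm : (PySem.Set.ofList S).contains x = false := by
        rw [Bool.eq_false_iff]; intro h
        exact hS ((PySem.Set.mem_ofList S x).mp ((PySem.Set.contains_iff _ x).mp h))
      simp only [hsm, Bool.false_and]
      by_cases ht : x ∈ t
      · simp only [if_pos ht]; exact ih s t acc hinv
      · simp only [if_neg ht, if_neg hS]
        refine ih s (t ++ [x]) acc ?_
        intro y hy
        rw [hinv y hy]
        simp only [List.mem_append, List.mem_singleton]
        constructor
        · exact Or.inl
        · rintro (h | rfl)
          · exact h
          · exact absurd hy hS

lemma pv_update_prefix : ∀ (xs : List Int) (t : PySem.Set Int), t <+: PySem.Set.update t xs := by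
  intro xs
  induction xs with
  | nil => intro t; simp [PySem.Set.update]
  | cons x xs ih =>
    intro t
    have : PySem.Set.update t (x :: xs) = PySem.Set.update (PySem.Set.add t x) xs := by
      simp [PySem.Set.update]
    rw [this]
    refine List.IsPrefix.trans ?_ (ih (PySem.Set.add t x))
    by_cases hx : x ∈ t
    · simp [PySem.Set.add, hx]
    · simp [PySem.Set.add, hx]

lemma pvCore_update (S : List Int) :
    ∀ (L : List Int) (t : PySem.Set Int),
      pvCore S L t = ((PySem.Set.update t L).drop t.length).filter (fun x => decide (x ∈ S)) := by
  intro L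
  induction L with
  | nil => intro t; simp [pvCore, PySem.Set.update]
  | cons x xs ih =>
    intro t
    have hupd : PySem.Set.update t (x :: xs) = PySem.Set.update (PySem.Set.add t x) xs := by
      simp [PySem.Set.update]
    by_cases ht : x ∈ t
    · have hadd : PySem.Set.add t x = t := by simp [PySem.Set.add, ht]
      simp only [pvCore, if_pos ht, hupd, hadd]
      exact ih t
    · have hadd : PySem.Set.add t x = t ++ [x] := by simp [PySem.Set.add, ht]
      obtain ⟨r, hr⟩ := pv_update_prefix xs (t ++ [x])
      simp only [pvCore, if_neg ht, hupd, hadd]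
      have h1 : (PySem.Set.update (t ++ [x]) xs).drop t.length = x :: r := by
        rw [← hr, List.append_assoc, List.drop_left]
        rfl
      have h2 : (PySem.Set.update (t ++ [x]) xs).drop (t ++ [x]).length = r := by
        rw [← hr, List.drop_left]
      have h3 := ih (t ++ [x])
      rw [h2] at h3
      rw [h1, List.filter_cons]
      by_cases hS : x ∈ S
      · simp only [hS, decide_true, if_true, h3]
      · simp only [hS, decide_false, Bool.false_eq_true, if_false, h3]

lemma pvA_vals (L : List Int) :
    ∀ (d : PySem.Dict Int (Option Bool)), (∀ p ∈ d.items, p.2 = none) →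
      ∀ p ∈ (L.foldl (fun d x => d.insert x none) d).items, p.2 = none := by
  induction L with
  | nil => intro d hd; simpa using hd
  | cons x xs ih =>
    intro d hd
    simp only [List.foldl_cons]
    refine ih (d.insert x none) ?_
    intro p hp
    rcases (PySem.Dict.mem_items_insert d x none p).mp hp with h | ⟨h, _⟩
    · rw [h]
    · exact hd p h

lemma pvA_items (L : List Int) :
    (L.foldl (fun d x => d.insert x (none : Option Bool)) PySem.Dict.empty).items
      = (PySem.Set.update [] L).map (fun k => (k, (none : Option Bool))) := by
  set d1 := L.foldl (fun d x => d.insert x (none : Option Bool)) PySem.Dict.empty with hd1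
  have hkeys : d1.keys = PySem.Set.update [] L := by
    rw [hd1]
    have := PySem.Dict.keys_foldl_insert L (fun _ _ => (none : Option Bool)) PySem.Dict.empty
    simpa [PySem.Dict.keys_empty] using this
  have hnd : d1.keys.Nodup := by
    rw [hd1]
    exact PySem.Dict.nodup_keys_foldl_insert L (fun _ _ => (none : Option Bool)) _ PySem.Dict.nodup_keys_empty
  have hvals : ∀ p ∈ d1.items, p.2 = none := by
    rw [hd1]
    refine pvA_vals L PySem.Dict.empty ?_
    simp [PySem.Dict.empty]
  rw [PySem.Dict.items_eq_map_keys d1 hnd none, ← hkeys]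
  refine List.map_congr_left ?_
  intro k hk
  cases hg : d1.get? k with
  | none => rw [PySem.Dict.getD_of_get?_eq_none d1 none hg]
  | some v =>
    have hmem : (k, v) ∈ d1.items := (PySem.Dict.get?_eq_some_iff_mem_items d1 k v hnd).mp hg
    have : v = none := hvals (k, v) hmem
    rw [PySem.Dict.getD_eq_get?_getD, hg, this]
    rfl

lemma pvA_mark :
    ∀ (S : List Int) (d : PySem.Dict Int (Option Bool)),
      (S.foldl (fun d x => if d.contains x = true then d.insert x (some true) else d) d).items
        = d.items.map (fun p => if p.1 ∈ S then (p.1, some true) else p) := by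
  intro S
  induction S with
  | nil => intro d; simp
  | cons x S' ih =>
    intro d
    simp only [List.foldl_cons]
    by_cases hc : d.contains x = true
    · rw [if_pos hc, ih (d.insert x (some true)),
        PySem.Dict.items_insert_of_contains d (some true) hc, List.map_map]
      refine List.map_congr_left ?_
      intro p _
      by_cases hx : p.1 = x
      · simp [Function.comp, hx]
      · have hbx : (p.1 == x) = false := by simp [hx]
        simp only [Function.comp_apply, hbx, Bool.false_eq_true, if_false, List.mem_cons]
        by_cases hS' : p.1 ∈ S'
        · simp [hS', hx]
        · simp [hS', hx]
    · rw [if_neg hc, ih d]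
      refine List.map_congr_left ?_
      intro p hp
      have hne : p.1 ≠ x := by
        intro h
        apply hc
        rw [PySem.Dict.contains_iff_mem_keys, ← h]
        exact PySem.Dict.mem_keys_of_mem_items d hp
      simp only [List.mem_cons]
      by_cases hS' : p.1 ∈ S'
      · simp [hS', hne]
      · simp [hS', hne]

-- both pipelines, written over larger list L and smaller list S, compute the same list
lemma pvMain (L S : List Int) :
    ((S.foldl (fun d x => if d.contains x = true then d.insert x (some true) else d)
        (L.foldl (fun d x => d.insert x (none : Option Bool)) PySem.Dict.empty)).items.filter
          (fun p => p.2 == some true)).map (fun p => p.1)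
      = (L.foldl
          (fun st x =>
            if (PySem.Set.ofList S).contains x && !(PySem.Set.contains st.1 x) then
              (PySem.Set.add st.1 x, st.2 ++ [x])
            else st)
          ((PySem.Set.empty : PySem.Set Int), ([] : List Int))).2 := by
  have hB := pvB_step S L PySem.Set.empty [] [] (fun x _ => Iff.rfl)
  have hBC := pvCore_update S L []
  rw [hB, hBC]
  rw [pvA_mark S _, pvA_items L, List.map_map, List.filter_map, List.map_map]
  simp only [List.drop_zero, List.nil_append, List.length_nil]
  have hf : ∀ k : Int,
      ((fun p : Int × Option Bool => p.2 == some true) ∘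
        ((fun p : Int × Option Bool => if p.1 ∈ S then (p.1, some true) else p) ∘
          fun k => (k, (none : Option Bool)))) k = decide (k ∈ S) := by
    intro k
    by_cases hS : k ∈ S <;> simp [Function.comp, hS]
  rw [List.filter_congr (fun k _ => hf k)]
  conv_rhs => rw [← List.map_id (List.filter (fun x => decide (x ∈ S)) (PySem.Set.update [] L))]
  refine List.map_congr_left ?_
  intro k hk
  by_cases hS : k ∈ S <;> simp [Function.comp, hS]

-- ===== VERDICT (by name: the statement is the Claim_ definition above) =====
theorem list_intersection_spec : Claim_equal_list_intersection := by
  intro lst1 lst2 _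
  unfold Spec_list_intersection list_intersection list_intersection_alt
  simp only []
  by_cases h : PySem.List.len lst2 < PySem.List.len lst1
  · have hN : lst2.length < lst1.length := by
      simpa [PySem.List.len] using h
    have hmax : max (PySem.List.len lst1) (PySem.List.len lst2) = PySem.List.len lst1 :=
      max_eq_left h.le
    have hmin : min (PySem.List.len lst1) (PySem.List.len lst2) = PySem.List.len lst2 :=
      min_eq_right h.le
    have hgt : PySem.List.len lst1 > PySem.List.len lst2 := h
    simp only [hmax, hmin, hgt, hN, not_le.mpr hgt, if_true, true_and, false_and, if_false]
    rw [PySem.List.foldl_pyRange_pyGetD lst1 0 (fun d x => d.insert x (none : Option Bool))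
          PySem.Dict.empty le_rfl,
        PySem.List.foldl_pyRange_pyGetD lst2 0
          (fun (d : PySem.Dict Int (Option Bool)) (x : Int) =>
            if d.contains x = true then d.insert x (some true) else d) _ le_rfl]
    simp only [Int.toNat_zero, List.drop_zero]
    exact pvMain lst1 lst2
  · have hN : ¬ lst1.length > lst2.length := by
      simpa [PySem.List.len] using h
    have hle : PySem.List.len lst1 ≤ PySem.List.len lst2 := not_lt.mp h
    have hmax : max (PySem.List.len lst1) (PySem.List.len lst2) = PySem.List.len lst2 :=
      max_eq_right hle
    have hmin : min (PySem.List.len lst1) (PySem.List.len lst2) = PySem.List.len lst1 :=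
      min_eq_left hle
    have hnot : ¬ (PySem.List.len lst1 > PySem.List.len lst2) := h
    simp only [hmax, hmin, hnot, hN, hle, true_and, false_and, if_false]
    rw [PySem.List.foldl_pyRange_pyGetD lst2 0 (fun d x => d.insert x (none : Option Bool))
          PySem.Dict.empty le_rfl,
        PySem.List.foldl_pyRange_pyGetD lst1 0
          (fun (d : PySem.Dict Int (Option Bool)) (x : Int) =>
            if d.contains x = true then d.insert x (some true) else d) _ le_rfl]
    simp only [Int.toNat_zero, List.drop_zero]
    exact pvMain lst2 lst1
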